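-- pv_equiv track=rewrite | github.com/WCbeardown/rating_graph_matome | main.py | lookup_points
-- ===== SOURCE A (Python) =====
-- def lookup_points(abs_diff):
--     table = [
--         (0, 12,  8, 8),
--         (13,37,  7,10),
--         (38,62,  6,13),
--         (63,87,  5,16),
--         (88,112, 4,20),
--         (113,137,3,25),
--         (138,162,2,30),
--         (163,187,2,35),
--         (188,212,1,40),
--         (213,237,1,45),
--         (238,99999,0,50),
--     ]
--     for lo, hi, high_pt, low_pt in table:
--         if lo <= abs_diff <= hi:
--             return high_pt, low_pt
--     return 0, 0
-- ===== SOURCE B (Python) =====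
-- HIGH_PTS = [8, 7, 6, 5, 4, 3, 2, 2, 1, 1, 0]
-- LOW_PTS  = [8, 10, 13, 16, 20, 25, 30, 35, 40, 45, 50]
--
-- def lookup_points(abs_diff):
--     if abs_diff < 0 or abs_diff > 99999:
--         return 0, 0
--     i = 0 if abs_diff <= 12 else min((abs_diff - 13) // 25 + 1, 10)
--     return HIGH_PTS[i], LOW_PTS[i]
-- ===== Notes on version B (the rewrite author's own statement) =====
-- stated objective: alternative
-- what changed: Replaces the linear scan over the eleven-row bracket table by a closed-form constant-time index computation (exploiting the uniform bracket width) into two parallel point arrays, after a single range check that reproduces the fallthrough default for negative and over-range inputs.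
import Mathlib
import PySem

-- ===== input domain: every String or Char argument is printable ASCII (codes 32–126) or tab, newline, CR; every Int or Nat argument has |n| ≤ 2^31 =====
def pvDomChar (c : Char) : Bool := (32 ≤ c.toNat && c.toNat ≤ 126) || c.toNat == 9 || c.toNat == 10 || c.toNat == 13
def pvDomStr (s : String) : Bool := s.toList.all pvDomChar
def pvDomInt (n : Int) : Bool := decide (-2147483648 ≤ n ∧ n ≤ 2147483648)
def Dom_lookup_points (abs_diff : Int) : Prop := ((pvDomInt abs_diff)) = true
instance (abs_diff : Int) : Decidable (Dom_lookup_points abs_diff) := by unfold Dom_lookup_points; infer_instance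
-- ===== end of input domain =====

-- B replaces A's linear scan of the bracket table by a closed-form index computation
-- into two parallel point arrays (alternative decomposition, same exact values).

-- ===== PORT A =====
-- A: scan the list of (lo, hi, high_pt, low_pt) rows, return at the first row containing abs_diff.
def lookupA_scan : List (Int × Int × Int × Int) → Int → Int × Int
  | [], _ => (0, 0)
  | (lo, hi, high_pt, low_pt) :: rest, x =>
      if lo ≤ x ∧ x ≤ hi then (high_pt, low_pt) else lookupA_scan rest x

def lookup_points (abs_diff : Int) : Int × Int :=
  lookupA_scan
    [(0, 12, 8, 8), (13, 37, 7, 10), (38, 62, 6, 13), (63, 87, 5, 16),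
     (88, 112, 4, 20), (113, 137, 3, 25), (138, 162, 2, 30), (163, 187, 2, 35),
     (188, 212, 1, 40), (213, 237, 1, 45), (238, 99999, 0, 50)] abs_diff

-- ===== PORT B =====
def highPts : List Int := [8, 7, 6, 5, 4, 3, 2, 2, 1, 1, 0]
def lowPts : List Int := [8, 10, 13, 16, 20, 25, 30, 35, 40, 45, 50]

def lookup_points_alt (abs_diff : Int) : Int × Int :=
  if abs_diff < 0 ∨ abs_diff > 99999 then (0, 0)
  else
    let i : Int := if abs_diff ≤ 12 then 0
                   else min (PySem.Int.floordiv (abs_diff - 13) 25 + 1) 10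
    -- i is provably in [0,10]; list indexing with a nonnegative in-range index
    (highPts.getD i.toNat 0, lowPts.getD i.toNat 0)

-- ===== PRECONDITION & SPEC =====
def Spec_lookup_points (abs_diff : Int) (out : Int × Int) : Prop := out = lookup_points_alt abs_diff
instance (abs_diff : Int) (out : Int × Int) : Decidable (Spec_lookup_points abs_diff out) := by unfold Spec_lookup_points; infer_instance

-- ===== CLAIM (what is proved, stated in full; the proofs are below) =====
def Claim_equal_lookup_points : Prop := ∀ (abs_diff : Int), Dom_lookup_points abs_diff → Spec_lookup_points abs_diff (lookup_points abs_diff)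

-- ===== LEMMAS AND PROOFS =====

-- the closed-form index of B equals q exactly on the q-th bracket (q = 1..9)
theorem index_eq (x q : Int)
    (h1 : 13 + 25 * q ≤ x) (h2 : x ≤ 37 + 25 * q) :
    PySem.Int.floordiv (x - 13) 25 = q := by
  rw [PySem.Int.floordiv_eq_iff_of_pos (by norm_num)]
  omega

-- ===== VERDICT (by name: the statement is the Claim_ definition above) =====
set_option maxHeartbeats 2000000 in
theorem lookup_points_spec : Claim_equal_lookup_points := by
  intro x _
  unfold Spec_lookup_points lookup_points lookup_points_alt
  by_cases h0 : x < 0 ∨ x > 99999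
  · simp only [if_pos h0, lookupA_scan]
    split_ifs <;> first | rfl | omega
  · rw [if_neg h0]
    by_cases h12 : x ≤ 12
    · simp only [if_pos h12, lookupA_scan]
      rw [if_pos (by omega : (0:Int) ≤ x ∧ x ≤ 12)]
      rfl
    · rw [if_neg h12]
      rcases (by omega :
          (13 ≤ x ∧ x ≤ 37) ∨ (38 ≤ x ∧ x ≤ 62) ∨ (63 ≤ x ∧ x ≤ 87) ∨
          (88 ≤ x ∧ x ≤ 112) ∨ (113 ≤ x ∧ x ≤ 137) ∨ (138 ≤ x ∧ x ≤ 162) ∨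
          (163 ≤ x ∧ x ≤ 187) ∨ (188 ≤ x ∧ x ≤ 212) ∨ (213 ≤ x ∧ x ≤ 237) ∨
          (238 ≤ x ∧ x ≤ 99999)) with h | h | h | h | h | h | h | h | h | h
      · rw [index_eq x 0 (by omega) (by omega)]
        simp only [lookupA_scan]
        split_ifs <;> first | rfl | omega
      · rw [index_eq x 1 (by omega) (by omega)]
        simp only [lookupA_scan]
        split_ifs <;> first | rfl | omega
      · rw [index_eq x 2 (by omega) (by omega)]
        simp only [lookupA_scan]
        split_ifs <;> first | rfl | omega
      · rw [index_eq x 3 (by omega) (by omega)]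
        simp only [lookupA_scan]
        split_ifs <;> first | rfl | omega
      · rw [index_eq x 4 (by omega) (by omega)]
        simp only [lookupA_scan]
        split_ifs <;> first | rfl | omega
      · rw [index_eq x 5 (by omega) (by omega)]
        simp only [lookupA_scan]
        split_ifs <;> first | rfl | omega
      · rw [index_eq x 6 (by omega) (by omega)]
        simp only [lookupA_scan]
        split_ifs <;> first | rfl | omega
      · rw [index_eq x 7 (by omega) (by omega)]
        simp only [lookupA_scan]
        split_ifs <;> first | rfl | omega
      · rw [index_eq x 8 (by omega) (by omega)]
        simp only [lookupA_scan]
        split_ifs <;> first | rfl | omega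
      · have h9 : min (PySem.Int.floordiv (x - 13) 25 + 1) 10 = 10 := by
          have : 9 ≤ PySem.Int.floordiv (x - 13) 25 := by
            rw [PySem.Int.le_floordiv_iff_mul_le (by norm_num)]; omega
          omega
        rw [h9]
        simp only [lookupA_scan]
        split_ifs <;> first | rfl | omega
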